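-- pv_equiv track=rewrite | github.com/gig4897/osmosis | tools/download_emoji.py | decode_c_string
-- ===== SOURCE A (Python) =====
-- def decode_c_string(s):
--     """Decode C-style escape sequences (\\xHH) to raw bytes, then UTF-8.
--
--     Returns (decoded_string, success). On failure, returns (raw_string, False).
--     """
--     # The file contains C string literals with \\xHH escape sequences.
--     # When read as text, these are literal characters: backslash, x, H, H.
--     # We need to convert them to actual bytes and then decode as UTF-8.
--     result = bytearray()
--     i = 0
--     while i < len(s):
--         if s[i] == '\\' and i + 1 < len(s) and s[i + 1] == 'x':
--             # Parse \\xHH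
--             hex_str = s[i + 2:i + 4]
--             result.append(int(hex_str, 16))
--             i += 4
--         else:
--             result.append(ord(s[i]))
--             i += 1
--     try:
--         return result.decode('utf-8'), True
--     except UnicodeDecodeError:
--         return s, False
-- ===== SOURCE B (Python) =====
-- def decode_c_string(s):
--     """Decode C-style escape sequences (\\xHH) to raw bytes, then UTF-8.
--
--     Returns (decoded_string, success). On failure, returns (raw_string, False).
--     """
--     parts = s.split('\\x')
--     buf = bytearray(map(ord, parts[0]))
--     for part in parts[1:]:
--         buf.append(int(part[:2], 16))
--         buf.extend(map(ord, part[2:]))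
--     try:
--         return buf.decode('utf-8'), True
--     except UnicodeDecodeError:
--         return s, False
-- ===== Notes on version B (the rewrite author's own statement) =====
-- stated objective: faster
-- what changed: Replaced A's char-by-char index while-loop with a split('\x')-driven segment pass: ords of the first segment, then for each later segment int of its first two chars followed by ords of the rest, fed to the same UTF-8 decode.
import Mathlib
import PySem

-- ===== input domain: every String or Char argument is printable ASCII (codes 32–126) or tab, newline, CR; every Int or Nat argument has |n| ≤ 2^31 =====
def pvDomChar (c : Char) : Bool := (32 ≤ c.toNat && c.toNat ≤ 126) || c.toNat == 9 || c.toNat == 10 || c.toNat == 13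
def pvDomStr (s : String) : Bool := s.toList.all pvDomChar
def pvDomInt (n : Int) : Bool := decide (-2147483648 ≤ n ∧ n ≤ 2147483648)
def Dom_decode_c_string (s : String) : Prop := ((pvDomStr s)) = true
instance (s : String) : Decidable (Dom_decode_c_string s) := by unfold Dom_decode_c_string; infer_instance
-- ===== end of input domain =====

-- B replaces A's char-by-char index scan with a split('\x')-driven segment pass over the
-- same bytes: same O(n) work, a constant-factor speedup measured.

-- ===== shared helpers (exact models of int(·,16) on a ≤2-char slice + bytearray.append,
-- a Python builtin combination BOTH versions invoke verbatim) =====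

-- value of a hex digit, as Python's int(·,16) accepts it
def hexVal? (c : Char) : Option Nat :=
  if '0' ≤ c ∧ c ≤ '9' then some (c.toNat - 48)
  else if 'a' ≤ c ∧ c ≤ 'f' then some (c.toNat - 87)
  else if 'A' ≤ c ∧ c ≤ 'F' then some (c.toNat - 55)
  else none

-- whitespace int(·,16) strips (restricted to Dom characters)
def isPySpace (c : Char) : Bool := c = ' ' ∨ c = '\t' ∨ c = '\n' ∨ c = '\r'

-- Models `int(h,16)` for the ≤2-char slice BOTH versions feed it, followed by
-- `bytearray.append`: some v (0 ≤ v ≤ 255) iff Python returns and appends, none iff it raises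
-- ValueError (empty/invalid hex, or a negative value like int('-1',16) that append rejects).
def parseEsc? : List Char → Option Nat
  | [c] => hexVal? c
  | [a, b] =>
    match hexVal? a, hexVal? b with
    | some x, some y => some (16 * x + y)
    | some x, none => if isPySpace b then some x else none
    | none, some y =>
      if isPySpace a ∨ a = '+' then some y
      else if a = '-' then (if y = 0 then some 0 else none) else none
    | none, none => none
  | _ => none

-- ===== PORT A =====

def contB (b : Nat) : Bool := 0x80 ≤ b && b ≤ 0xBF

-- A's `bytes.decode('utf-8')` (strict), written as A-side multi-byte pattern matching:
-- some chars, or none iff UnicodeDecodeError.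
def utf8Decode? : List Nat → Option (List Char)
  | [] => some []
  | b :: rest =>
    if b < 0x80 then (utf8Decode? rest).map (Char.ofNat b :: ·)
    else if 0xC2 ≤ b ∧ b ≤ 0xDF then
      match rest with
      | b2 :: r =>
        if contB b2 then (utf8Decode? r).map (Char.ofNat ((b - 0xC0) * 64 + (b2 - 0x80)) :: ·)
        else none
      | [] => none
    else if 0xE0 ≤ b ∧ b ≤ 0xEF then
      match rest with
      | b2 :: b3 :: r =>
        let lo := if b = 0xE0 then 0xA0 else 0x80
        let hi := if b = 0xED then 0x9F else 0xBF
        if (lo ≤ b2 && b2 ≤ hi) && contB b3 then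
          (utf8Decode? r).map (Char.ofNat ((b - 0xE0) * 4096 + (b2 - 0x80) * 64 + (b3 - 0x80)) :: ·)
        else none
      | _ => none
    else if 0xF0 ≤ b ∧ b ≤ 0xF4 then
      match rest with
      | b2 :: b3 :: b4 :: r =>
        let lo := if b = 0xF0 then 0x90 else 0x80
        let hi := if b = 0xF4 then 0x8F else 0xBF
        if ((lo ≤ b2 && b2 ≤ hi) && contB b3) && contB b4 then
          (utf8Decode? r).map
            (Char.ofNat ((b - 0xF0) * 262144 + (b2 - 0x80) * 4096 + (b3 - 0x80) * 64 + (b4 - 0x80)) :: ·)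
        else none
      | _ => none
    else none

-- A's while loop over index i: c = s[i], rest = s[i+1:]; none = uncaught ValueError.
def aLoop : List Char → Option (List Nat)
  | [] => some []
  | c :: rest =>
    if c = '\\' ∧ rest.head? = some 'x' then
      match parseEsc? (rest.tail.take 2) with
      | none => none
      | some b => (aLoop (rest.tail.drop 2)).map (b :: ·)
    else (aLoop rest).map (c.toNat :: ·)
termination_by cs => cs.length
decreasing_by
  all_goals simp

def decode_c_string (s : String) : String × Bool :=
  match aLoop s.toList with
  | none => ("", false)  -- A raises here; excluded by Pre_
  | some bs =>
    match utf8Decode? bs with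
    | some cs => (String.ofList cs, true)
    | none => (s, false)

-- ===== PORT B =====
-- s.split('\x') on the character list
def splitEsc : List Char → List (List Char)
  | [] => [[]]
  | c :: rest =>
    if c = '\\' ∧ rest.head? = some 'x' then [] :: splitEsc rest.tail
    else
      match splitEsc rest with
      | [] => [[c]]
      | p :: ps => (c :: p) :: ps
termination_by cs => cs.length
decreasing_by
  all_goals simp

-- one iteration of B's for-loop: append int(part[:2],16), extend with ords of part[2:]
def bStep (acc : Option (List Nat)) (p : List Char) : Option (List Nat) :=
  acc.bind fun l => (parseEsc? (p.take 2)).map fun b => l ++ (b :: (p.drop 2).map Char.toNat)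

-- B's `bytes.decode('utf-8')` (strict), written as a byte-at-a-time state machine:
-- `need` pending continuation bytes for a code point built up in `cp`, the next byte
-- constrained to [lo,hi]; none iff UnicodeDecodeError.
def utf8SM (need cp lo hi : Nat) : List Nat → Option (List Char)
  | [] => if need = 0 then some [] else none
  | b :: r =>
    if need = 0 then
      if b ≤ 0x7F then (utf8SM 0 0 0 0 r).map (Char.ofNat b :: ·)
      else if b ≤ 0xC1 then none
      else if b ≤ 0xDF then utf8SM 1 (b - 0xC0) 0x80 0xBF r
      else if b ≤ 0xEF then
        utf8SM 2 (b - 0xE0) (if b = 0xE0 then 0xA0 else 0x80) (if b = 0xED then 0x9F else 0xBF) r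
      else if b ≤ 0xF4 then
        utf8SM 3 (b - 0xF0) (if b = 0xF0 then 0x90 else 0x80) (if b = 0xF4 then 0x8F else 0xBF) r
      else none
    else if lo ≤ b ∧ b ≤ hi then
      if need = 1 then (utf8SM 0 0 0 0 r).map (Char.ofNat (cp * 64 + (b - 0x80)) :: ·)
      else utf8SM (need - 1) (cp * 64 + (b - 0x80)) 0x80 0xBF r
    else none

def decode_c_string_alt (s : String) : String × Bool :=
  -- parts = s.split('\x'); parts[0] → ords, each later part → int(part[:2],16) then ords
  match ((splitEsc s.toList).tail).foldl bStep
      (some (((splitEsc s.toList).headD []).map Char.toNat)) with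
  | none => ("", false)  -- B raises here; excluded by Pre_
  | some bs =>
    match utf8SM 0 0 0 0 bs with
    | some cs => (String.ofList cs, true)
    | none => (s, false)

-- ===== PRECONDITION & SPEC =====
-- Pre_ excludes exactly the inputs on which A raises an uncaught ValueError
-- (a "\x" escape whose two-char slice is not valid hex for int(·,16), runs past the
-- end of the string, or parses to a negative value that bytearray.append rejects):
-- closed form: after every occurrence of "\x" the next (up to) two characters must parse.
def Pre_decode_c_string (s : String) : Prop :=
  ∀ i, i < s.toList.length → ((s.toList.drop i).take 2 = ['\\', 'x'] →
    (parseEsc? ((s.toList.drop (i + 2)).take 2)).isSome = true)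
instance (s : String) : Decidable (Pre_decode_c_string s) := by unfold Pre_decode_c_string; infer_instance

def pvWitness_decode_c_string : String := "ab\\x41c"

def Spec_decode_c_string (s : String) (out : String × Bool) : Prop := out = decode_c_string_alt s
instance (s : String) (out : String × Bool) : Decidable (Spec_decode_c_string s out) := by unfold Spec_decode_c_string; infer_instance

-- ===== CLAIM (what is proved, stated in full; the proofs are below) =====
def Claim_equal_decode_c_string : Prop := ∀ (s : String), Dom_decode_c_string s → Pre_decode_c_string s → Spec_decode_c_string s (decode_c_string s)

-- ===== LEMMAS AND PROOFS =====

-- cons-step equation for utf8Decode? (its equations are not simp-friendly: nested match)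
theorem utf8D_cons (b : Nat) (rest : List Nat) : utf8Decode? (b :: rest) =
    (if b < 0x80 then (utf8Decode? rest).map (Char.ofNat b :: ·)
    else if 0xC2 ≤ b ∧ b ≤ 0xDF then
      match rest with
      | b2 :: r =>
        if contB b2 then (utf8Decode? r).map (Char.ofNat ((b - 0xC0) * 64 + (b2 - 0x80)) :: ·)
        else none
      | [] => none
    else if 0xE0 ≤ b ∧ b ≤ 0xEF then
      match rest with
      | b2 :: b3 :: r =>
        let lo := if b = 0xE0 then 0xA0 else 0x80
        let hi := if b = 0xED then 0x9F else 0xBF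
        if (lo ≤ b2 && b2 ≤ hi) && contB b3 then
          (utf8Decode? r).map (Char.ofNat ((b - 0xE0) * 4096 + (b2 - 0x80) * 64 + (b3 - 0x80)) :: ·)
        else none
      | _ => none
    else if 0xF0 ≤ b ∧ b ≤ 0xF4 then
      match rest with
      | b2 :: b3 :: b4 :: r =>
        let lo := if b = 0xF0 then 0x90 else 0x80
        let hi := if b = 0xF4 then 0x8F else 0xBF
        if ((lo ≤ b2 && b2 ≤ hi) && contB b3) && contB b4 then
          (utf8Decode? r).map
            (Char.ofNat ((b - 0xF0) * 262144 + (b2 - 0x80) * 4096 + (b3 - 0x80) * 64 + (b4 - 0x80)) :: ·)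
        else none
      | _ => none
    else none) := by
  rw [utf8Decode?.eq_def]

-- the two models of bytes.decode('utf-8') agree
theorem utf8SM_eq (l : List Nat) : utf8SM 0 0 0 0 l = utf8Decode? l := by
  induction hn : l.length using Nat.strong_induction_on generalizing l with
  | _ n ih =>
  subst hn
  match l with
  | [] => rfl
  | b :: r =>
    have ihr : ∀ (r' : List Nat), r'.length ≤ r.length →
        utf8SM 0 0 0 0 r' = utf8Decode? r' := by
      intro r' h
      exact ih r'.length (by simp only [List.length_cons]; omega) r' rfl
    by_cases h1 : b < 0x80
    · rw [utf8D_cons]; simp only [utf8SM]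
      rw [if_pos True.intro, if_pos (by omega : b ≤ 0x7F), if_pos h1, ihr r (Nat.le_refl _)]
    · by_cases h2 : b ≤ 0xC1
      · rw [utf8D_cons]; simp only [utf8SM]
        rw [if_pos True.intro, if_neg (by omega : ¬ b ≤ 0x7F), if_pos h2,
            if_neg h1, if_neg (by omega : ¬ (0xC2 ≤ b ∧ b ≤ 0xDF)),
            if_neg (by omega : ¬ (0xE0 ≤ b ∧ b ≤ 0xEF)),
            if_neg (by omega : ¬ (0xF0 ≤ b ∧ b ≤ 0xF4))]
      · by_cases h3 : b ≤ 0xDF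
        · -- two-byte sequence
          rw [utf8D_cons]; simp only [utf8SM]
          rw [if_pos True.intro, if_neg (by omega : ¬ b ≤ 0x7F), if_neg h2, if_pos h3,
              if_neg h1, if_pos (by omega : 0xC2 ≤ b ∧ b ≤ 0xDF)]
          match r with
          | [] => rfl
          | b2 :: r2 =>
            by_cases hb2 : 0x80 ≤ b2 ∧ b2 ≤ 0xBF
            · simp [utf8SM, contB, hb2.1, hb2.2, ihr r2 (by simp only [List.length_cons]; omega)]
            · simp only [utf8SM, contB]
              rw [if_neg (by omega : ¬ (1:Nat) = 0), if_neg hb2]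
              simp [show ¬ (0x80 ≤ b2 ∧ b2 ≤ 0xBF) from hb2]
        · by_cases h4 : b ≤ 0xEF
          · -- three-byte sequence
            rw [utf8D_cons]; simp only [utf8SM]
            rw [if_pos True.intro, if_neg (by omega : ¬ b ≤ 0x7F), if_neg h2, if_neg h3, if_pos h4,
                if_neg h1, if_neg (by omega : ¬ (0xC2 ≤ b ∧ b ≤ 0xDF)),
                if_pos (by omega : 0xE0 ≤ b ∧ b ≤ 0xEF)]
            match r with
            | [] => rfl
            | [b2] => simp [utf8SM, ite_self]
            | b2 :: b3 :: r3 =>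
              by_cases hb2 : (if b = 0xE0 then 0xA0 else 0x80) ≤ b2 ∧
                  b2 ≤ (if b = 0xED then 0x9F else 0xBF)
              · by_cases hb3 : 0x80 ≤ b3 ∧ b3 ≤ 0xBF
                · have harith : ((b - 0xE0) * 64 + (b2 - 0x80)) * 64 + (b3 - 0x80) =
                      (b - 0xE0) * 4096 + (b2 - 0x80) * 64 + (b3 - 0x80) := by omega
                  simp [utf8SM, contB, hb2, hb3.1, hb3.2,
                        ihr r3 (by simp only [List.length_cons]; omega), harith]
                · simp [utf8SM, contB, hb2, show ¬ (0x80 ≤ b3 ∧ b3 ≤ 0xBF) from hb3]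
              · simp only [utf8SM, contB]
                rw [if_neg (by omega : ¬ (2:Nat) = 0), if_neg hb2]
                have : ¬ ((if b = 0xE0 then 0xA0 else 0x80) ≤ b2 ∧
                    b2 ≤ (if b = 0xED then 0x9F else 0xBF)) := hb2
                simp [this]
          · by_cases h5 : b ≤ 0xF4
            · -- four-byte sequence
              rw [utf8D_cons]; simp only [utf8SM]
              rw [if_pos True.intro, if_neg (by omega : ¬ b ≤ 0x7F), if_neg h2, if_neg h3,
                  if_neg h4, if_pos h5,
                  if_neg h1, if_neg (by omega : ¬ (0xC2 ≤ b ∧ b ≤ 0xDF)),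
                  if_neg (by omega : ¬ (0xE0 ≤ b ∧ b ≤ 0xEF)),
                  if_pos (by omega : 0xF0 ≤ b ∧ b ≤ 0xF4)]
              match r with
              | [] => rfl
              | [b2] => simp [utf8SM, ite_self]
              | [b2, b3] => simp [utf8SM, ite_self]
              | b2 :: b3 :: b4 :: r4 =>
                by_cases hb2 : (if b = 0xF0 then 0x90 else 0x80) ≤ b2 ∧
                    b2 ≤ (if b = 0xF4 then 0x8F else 0xBF)
                · by_cases hb3 : 0x80 ≤ b3 ∧ b3 ≤ 0xBF
                  · by_cases hb4 : 0x80 ≤ b4 ∧ b4 ≤ 0xBF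
                    · have harith : (((b - 0xF0) * 64 + (b2 - 0x80)) * 64 + (b3 - 0x80)) * 64
                            + (b4 - 0x80) =
                          (b - 0xF0) * 262144 + (b2 - 0x80) * 4096 + (b3 - 0x80) * 64
                            + (b4 - 0x80) := by omega
                      simp [utf8SM, contB, hb2, hb3.1, hb3.2, hb4.1, hb4.2,
                            ihr r4 (by simp only [List.length_cons]; omega), harith]
                    · simp [utf8SM, contB, hb2, hb3.1, hb3.2,
                            show ¬ (0x80 ≤ b4 ∧ b4 ≤ 0xBF) from hb4]
                  · simp [utf8SM, contB, hb2, show ¬ (0x80 ≤ b3 ∧ b3 ≤ 0xBF) from hb3]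
                · simp only [utf8SM, contB]
                  rw [if_neg (by omega : ¬ (3:Nat) = 0), if_neg hb2]
                  have : ¬ ((if b = 0xF0 then 0x90 else 0x80) ≤ b2 ∧
                      b2 ≤ (if b = 0xF4 then 0x8F else 0xBF)) := hb2
                  simp [this]
            · rw [utf8D_cons]; simp only [utf8SM]
              rw [if_pos True.intro, if_neg (by omega : ¬ b ≤ 0x7F), if_neg h2, if_neg h3,
                  if_neg h4, if_neg h5,
                  if_neg h1, if_neg (by omega : ¬ (0xC2 ≤ b ∧ b ≤ 0xDF)),
                  if_neg (by omega : ¬ (0xE0 ≤ b ∧ b ≤ 0xEF)),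
                  if_neg (by omega : ¬ (0xF0 ≤ b ∧ b ≤ 0xF4))]

-- each "\x" escape of A's scan must carry valid hex: every later split part either has ≥2
-- chars whose first two parse, or is the final (possibly short) part and parses
def partsOk : List (List Char) → Bool
  | [] => true
  | [p] => (parseEsc? (p.take 2)).isSome
  | p :: ps => (decide (2 ≤ p.length) && (parseEsc? (p.take 2)).isSome) && partsOk ps

-- Pre_ restated over the character list
def PosOk (cs : List Char) : Prop :=
  ∀ i, i < cs.length → ((cs.drop i).take 2 = ['\\', 'x'] →
    (parseEsc? ((cs.drop (i + 2)).take 2)).isSome = true)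

theorem posOk_drop (cs : List Char) (k : Nat) (h : PosOk cs) : PosOk (cs.drop k) := by
  intro i hi hpat
  have hlen : k + i < cs.length := by
    simp only [List.length_drop] at hi; omega
  have hd : ∀ m : Nat, (cs.drop k).drop m = cs.drop (k + m) := by
    intro m; rw [List.drop_drop]
  rw [hd] at hpat
  have := h (k + i) hlen hpat
  rw [hd, show k + (i + 2) = k + i + 2 by omega]
  exact this

theorem drop_at_sep (p r : List Char) : (p ++ '\\' :: 'x' :: r).drop p.length = '\\' :: 'x' :: r := by
  simp

theorem drop_past_sep (p r : List Char) : (p ++ '\\' :: 'x' :: r).drop (p.length + 2) = r := by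
  rw [List.drop_append]
  simp

theorem stepFacts (p r : List Char) (h : PosOk (p ++ '\\' :: 'x' :: r)) :
    PosOk r ∧ (parseEsc? (r.take 2)).isSome = true := by
  have h2 := drop_past_sep p r
  constructor
  · have := posOk_drop _ (p.length + 2) h
    rwa [h2] at this
  · have hl : p.length < (p ++ '\\' :: 'x' :: r).length := by simp
    have := h p.length hl (by rw [drop_at_sep]; rfl)
    rwa [h2] at this

theorem parse_bsx : parseEsc? ['\\', 'x'] = none := rfl

theorem parse_bs2 (a : Char) : parseEsc? [a, '\\'] = none := by
  have h1 : hexVal? '\\' = none := rfl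
  cases h : hexVal? a <;> simp [parseEsc?, h, h1, isPySpace]


-- does the list contain the two-char separator "\x"?
def hasSep : List Char → Bool
  | [] => false
  | c :: r => (c = '\\' && r.head? = some 'x') || hasSep r

-- B's loop, written as structural recursion producing the bytes of parts[1:]
def bRest : List (List Char) → Option (List Nat)
  | [] => some []
  | p :: ps =>
    match parseEsc? (p.take 2) with
    | none => none
    | some b => (bRest ps).map fun l => b :: ((p.drop 2).map Char.toNat ++ l)

theorem splitEsc_nil : splitEsc [] = [[]] := by simp [splitEsc]

theorem splitEsc_sep (t : List Char) : splitEsc ('\\' :: 'x' :: t) = [] :: splitEsc t := by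
  rw [splitEsc]; simp

theorem splitEsc_cons (c : Char) (rest : List Char)
    (hc : ¬ (c = '\\' ∧ rest.head? = some 'x')) (q : List Char) (qs : List (List Char))
    (h : splitEsc rest = q :: qs) : splitEsc (c :: rest) = (c :: q) :: qs := by
  rw [splitEsc, if_neg hc, h]

theorem aLoop_nil : aLoop [] = some [] := by simp [aLoop]

theorem aLoop_sep (t : List Char) :
    aLoop ('\\' :: 'x' :: t) =
      match parseEsc? (t.take 2) with
      | none => none
      | some b => (aLoop (t.drop 2)).map (b :: ·) := by
  rw [aLoop]; simp

theorem aLoop_cons (c : Char) (rest : List Char)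
    (hc : ¬ (c = '\\' ∧ rest.head? = some 'x')) :
    aLoop (c :: rest) = (aLoop rest).map (c.toNat :: ·) := by
  rw [aLoop, if_neg hc]

theorem foldl_bStep_none (ps : List (List Char)) : ps.foldl bStep none = none := by
  induction ps with
  | nil => rfl
  | cons p ps ih => simpa [bStep] using ih

theorem foldl_bStep_some (ps : List (List Char)) (init : List Nat) :
    ps.foldl bStep (some init) = (bRest ps).map (fun l => init ++ l) := by
  induction ps generalizing init with
  | nil => simp [bRest]
  | cons p ps ih =>
    simp only [List.foldl_cons, bStep, Option.bind_some, bRest]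
    cases h : parseEsc? (p.take 2) with
    | none => simp [foldl_bStep_none]
    | some b =>
      simp only [Option.map_some]
      rw [ih]
      cases bRest ps <;> simp

theorem hasSep_tail (c : Char) (r : List Char) (h : hasSep (c :: r) = false) :
    hasSep r = false := by
  simp [hasSep] at h; exact h.2

theorem hasSep_drop2 (q : List Char) (h : hasSep q = false) : hasSep (q.drop 2) = false := by
  match q with
  | [] => exact h
  | [a] => simp [hasSep]
  | a :: b :: r => exact hasSep_tail b r (hasSep_tail a (b :: r) h)

theorem aLoop_noSep (cs : List Char) (h : hasSep cs = false) :
    aLoop cs = some (cs.map Char.toNat) := by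
  induction cs with
  | nil => exact aLoop_nil
  | cons c r ih =>
    have hc : ¬ (c = '\\' ∧ r.head? = some 'x') := by
      simp [hasSep] at h; intro hh; exact absurd hh.2 (by simpa [hh.1] using h.1)
    rw [aLoop_cons c r hc, ih (hasSep_tail c r h)]
    rfl

theorem aLoop_append_sep (p r : List Char) (h : hasSep p = false) :
    aLoop (p ++ '\\' :: 'x' :: r) =
      (aLoop ('\\' :: 'x' :: r)).map (fun l => p.map Char.toNat ++ l) := by
  induction p with
  | nil => simp
  | cons c p' ih =>
    have hc : ¬ (c = '\\' ∧ (p' ++ '\\' :: 'x' :: r).head? = some 'x') := by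
      cases p' with
      | nil => simp
      | cons d p'' =>
        simp only [List.cons_append, List.head?_cons]
        intro hh
        simp [hasSep, hh.1] at h
        exact absurd hh.2 (by simpa using h.1)
    rw [List.cons_append, aLoop_cons c _ hc, ih (hasSep_tail c p' h)]
    cases aLoop ('\\' :: 'x' :: r) <;> simp

theorem splitEsc_ne_nil (cs : List Char) : splitEsc cs ≠ [] := by
  match cs with
  | [] => simp [splitEsc]
  | c :: rest =>
    rw [splitEsc]
    split
    · simp
    · cases splitEsc rest <;> simp

theorem split_decomp (cs p : List Char) (ps : List (List Char))
    (h : splitEsc cs = p :: ps) :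
    hasSep p = false ∧
      ((ps = [] ∧ cs = p) ∨ ∃ r, cs = p ++ '\\' :: 'x' :: r ∧ splitEsc r = ps) := by
  induction cs generalizing p ps with
  | nil =>
    rw [splitEsc_nil] at h
    obtain ⟨rfl, rfl⟩ := List.cons.inj h
    exact ⟨rfl, Or.inl ⟨rfl, rfl⟩⟩
  | cons c rest ih =>
    by_cases hc : c = '\\' ∧ rest.head? = some 'x'
    · obtain ⟨d, t, rfl⟩ : ∃ d t, rest = d :: t := by
        cases rest with
        | nil => simp at hc
        | cons d t => exact ⟨d, t, rfl⟩
      simp only [List.head?_cons, Option.some.injEq] at hc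
      obtain ⟨rfl, rfl⟩ := hc
      rw [splitEsc_sep] at h
      obtain ⟨rfl, rfl⟩ := List.cons.inj h
      exact ⟨rfl, Or.inr ⟨t, rfl, rfl⟩⟩
    · cases hs : splitEsc rest with
      | nil => exact absurd hs (splitEsc_ne_nil rest)
      | cons q qs =>
        rw [splitEsc_cons c rest hc q qs hs] at h
        obtain ⟨rfl, rfl⟩ := List.cons.inj h
        obtain ⟨hq, hdec⟩ := ih q qs hs
        have hp : hasSep (c :: q) = false := by
          have hhead : ¬ (c = '\\' ∧ q.head? = some 'x') := by
            intro hh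
            apply hc
            refine ⟨hh.1, ?_⟩
            rcases hdec with ⟨_, rfl⟩ | ⟨r, rfl, _⟩
            · exact hh.2
            · cases q with
              | nil => simp at hh
              | cons d t => simpa using hh.2
          simp only [hasSep, hq, Bool.or_false]
          by_cases h1 : c = '\\'
          · by_cases h2 : q.head? = some 'x'
            · exact absurd ⟨h1, h2⟩ hhead
            · simp [h2]
          · simp [h1]
        refine ⟨hp, ?_⟩
        rcases hdec with ⟨rfl, rfl⟩ | ⟨r, rfl, hr⟩
        · exact Or.inl ⟨rfl, rfl⟩
        · exact Or.inr ⟨r, rfl, hr⟩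

theorem partsOk_of_posOk (cs q : List Char) (qs : List (List Char))
    (hsp : splitEsc cs = q :: qs) (hpos : PosOk cs)
    (hparse : (parseEsc? (cs.take 2)).isSome = true) : partsOk (q :: qs) = true := by
  induction hn : cs.length using Nat.strong_induction_on generalizing cs q qs with
  | _ n ih =>
  subst hn
  obtain ⟨hqsep, hdec⟩ := split_decomp cs q qs hsp
  rcases hdec with ⟨rfl, rfl⟩ | ⟨r, rfl, hr⟩
  · simpa [partsOk] using hparse
  · cases qs with
    | nil => exact absurd hr (splitEsc_ne_nil r)
    | cons q2 qs2 =>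
      obtain ⟨hposr, hparser⟩ := stepFacts q r hpos
      have hlen2 : 2 ≤ q.length := by
        match q with
        | [] => simp [parse_bsx] at hparse
        | [a] => simp [List.take, parse_bs2] at hparse
        | a :: b :: t => simp
      have htake : (q ++ '\\' :: 'x' :: r).take 2 = q.take 2 :=
        List.take_append_of_le_length hlen2
      have hrest := ih r.length (by simp; omega) r q2 qs2 hr hposr hparser rfl
      rw [htake] at hparse
      simp [partsOk, hlen2, hparse, hrest]

theorem partsOk_tail_of_posOk (cs p : List Char) (ps : List (List Char))
    (hpos : PosOk cs) (hsp : splitEsc cs = p :: ps) : partsOk ps = true := by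
  cases ps with
  | nil => rfl
  | cons q2 qs2 =>
    obtain ⟨_, hdec⟩ := split_decomp cs p _ hsp
    rcases hdec with ⟨h0, _⟩ | ⟨r, rfl, hr⟩
    · exact absurd h0 (by simp)
    · obtain ⟨hposr, hparser⟩ := stepFacts p r hpos
      exact partsOk_of_posOk r q2 qs2 hr hposr hparser

theorem main_lemma (cs p : List Char) (ps : List (List Char))
    (hsplit : splitEsc cs = p :: ps) (hok : partsOk ps = true) :
    aLoop cs = (bRest ps).map (fun l => p.map Char.toNat ++ l) := by
  induction hn : cs.length using Nat.strong_induction_on generalizing cs p ps with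
  | _ n ih =>
  subst hn
  match cs with
  | [] =>
    rw [splitEsc_nil] at hsplit
    obtain ⟨rfl, rfl⟩ := List.cons.inj hsplit
    simp [aLoop_nil, bRest]
  | c :: rest =>
    by_cases hc : c = '\\' ∧ rest.head? = some 'x'
    · obtain ⟨d, t, rfl⟩ : ∃ d t, rest = d :: t := by
        cases rest with
        | nil => simp at hc
        | cons d t => exact ⟨d, t, rfl⟩
      simp only [List.head?_cons, Option.some.injEq] at hc
      obtain ⟨rfl, rfl⟩ := hc
      rw [splitEsc_sep] at hsplit
      obtain ⟨rfl, rfl⟩ := List.cons.inj hsplit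
      rw [aLoop_sep]
      cases hq : splitEsc t with
      | nil => exact absurd hq (splitEsc_ne_nil t)
      | cons q qs =>
        rw [hq] at hok
        obtain ⟨hqsep, hdec⟩ := split_decomp t q qs hq
        cases qs with
        | nil =>
          rcases hdec with ⟨_, rfl⟩ | ⟨r, _, hr⟩
          · simp only [partsOk] at hok
            cases hb : parseEsc? (t.take 2) with
            | none => simp [hb] at hok
            | some b =>
              simp [aLoop_noSep (t.drop 2) (hasSep_drop2 t hqsep), bRest, hb]
          · exact absurd hr (splitEsc_ne_nil r)
        | cons q2 qs' =>
          rcases hdec with ⟨hcontra, _⟩ | ⟨r, rfl, hr⟩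
          · simp at hcontra
          · simp only [partsOk, Bool.and_eq_true, decide_eq_true_eq] at hok
            obtain ⟨⟨hlen, hsome⟩, hokrest⟩ := hok
            cases hb : parseEsc? (q.take 2) with
            | none => simp [hb] at hsome
            | some b =>
              have htake : (q ++ '\\' :: 'x' :: r).take 2 = q.take 2 :=
                List.take_append_of_le_length hlen
              have hdrop : (q ++ '\\' :: 'x' :: r).drop 2 = q.drop 2 ++ '\\' :: 'x' :: r :=
                List.drop_append_of_le_length hlen
              rw [htake, hb, hdrop, aLoop_append_sep (q.drop 2) r (hasSep_drop2 q hqsep)]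
              have hlt : ('\\' :: 'x' :: r).length < (('\\' : Char) :: 'x' :: (q ++ '\\' :: 'x' :: r)).length := by
                simp; omega
              have hsplit' : splitEsc ('\\' :: 'x' :: r) = [] :: (q2 :: qs') := by
                rw [splitEsc_sep, hr]
              rw [ih _ hlt ('\\' :: 'x' :: r) [] (q2 :: qs') hsplit' hokrest rfl]
              have hbr : bRest (q :: q2 :: qs') =
                  (bRest (q2 :: qs')).map (fun l => b :: ((q.drop 2).map Char.toNat ++ l)) := by
                simp [bRest, hb]
              rw [hbr]
              cases bRest (q2 :: qs') <;> simp
    · cases hs : splitEsc rest with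
      | nil => exact absurd hs (splitEsc_ne_nil rest)
      | cons q qs =>
        rw [splitEsc_cons c rest hc q qs hs] at hsplit
        obtain ⟨rfl, rfl⟩ := List.cons.inj hsplit
        rw [aLoop_cons c rest hc, ih rest.length (by simp) rest q qs hs hok rfl]
        cases bRest qs <;> simp

-- ===== VERDICT (by name: the statement is the Claim_ definition above) =====
theorem decode_c_string_spec : Claim_equal_decode_c_string := by
  intro s _ hpre
  unfold Spec_decode_c_string decode_c_string decode_c_string_alt
  have hpos : PosOk s.toList := hpre
  cases hsplit : splitEsc s.toList with
  | nil => exact absurd hsplit (splitEsc_ne_nil _)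
  | cons p ps =>
    have hok : partsOk ps = true := partsOk_tail_of_posOk s.toList p ps hpos hsplit
    have hbytes : aLoop s.toList = List.foldl bStep (some (p.map Char.toNat)) ps := by
      rw [main_lemma s.toList p ps hsplit hok, foldl_bStep_some]
    simp only [List.tail_cons, List.headD_cons]
    rw [hbytes]
    cases List.foldl bStep (some (p.map Char.toNat)) ps with
    | none => rfl
    | some bs => simp only [utf8SM_eq]
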